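-- pv_equiv track=rewrite | github.com/tynemeshkaii/twitchx | core/chats/twitch_chat.py | _unescape_tag
-- ===== SOURCE A (Python) =====
-- def _unescape_tag(value: str) -> str:
--     """Unescape IRCv3 tag value.
--
--     Split on ``\\\\`` first so that single-backslash sequences inside each
--     segment are unambiguous, then rejoin with a literal ``\\``.  This avoids
--     the NUL-byte placeholder trick which breaks on rare inputs containing \\x00.
--     """
--     parts = value.split("\\\\")
--     for i, part in enumerate(parts):
--         part = part.replace("\\s", " ")
--         part = part.replace("\\n", "\n")
--         part = part.replace("\\r", "\r")
--         part = part.replace("\\:", ";")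
--         parts[i] = part
--     return "\\".join(parts)
-- ===== SOURCE B (Python) =====
-- _ESCAPES = {"s": " ", "n": "\n", "r": "\r", ":": ";", "\\": "\\"}
--
--
-- def _unescape_tag(value: str) -> str:
--     """Unescape IRCv3 tag value in a single left-to-right scan."""
--     out = []
--     i = 0
--     n = len(value)
--     while i < n:
--         c = value[i]
--         if c == "\\" and i + 1 < n:
--             rep = _ESCAPES.get(value[i + 1])
--             if rep is not None:
--                 out.append(rep)
--                 i += 2
--                 continue
--         # lone trailing backslash or unknown escape: keep the backslash,
--         # the following character (if any) is processed normally next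
--         out.append(c)
--         i += 1
--     return "".join(out)
-- ===== Notes on version B (the rewrite author's own statement) =====
-- stated objective: alternative
-- what changed: A splits on double backslashes, runs four sequential replace passes over every segment and rejoins; B is a single left-to-right scan that resolves each backslash escape pair in one step.
import Mathlib
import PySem

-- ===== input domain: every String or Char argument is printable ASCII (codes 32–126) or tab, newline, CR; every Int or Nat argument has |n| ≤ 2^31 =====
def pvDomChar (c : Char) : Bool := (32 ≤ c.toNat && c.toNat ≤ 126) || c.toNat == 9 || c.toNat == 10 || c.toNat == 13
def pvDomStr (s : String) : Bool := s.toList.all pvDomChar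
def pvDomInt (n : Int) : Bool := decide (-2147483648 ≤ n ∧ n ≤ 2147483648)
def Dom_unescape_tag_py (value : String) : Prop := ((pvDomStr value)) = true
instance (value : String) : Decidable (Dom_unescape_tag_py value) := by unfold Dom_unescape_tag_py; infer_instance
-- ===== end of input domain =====

-- B replaces A's split-on-"\\\\" + four sequential replace passes + join with a single
-- left-to-right scan resolving each escape pair in one step (objective: alternative).

-- ===== PORT A =====
-- literal transliteration of A: split on "\\", four replaces per part, join with "\"
def unescape_tag_py (value : String) : String :=
  let parts := (PySem.Str.split? value "\\\\").getD []
  let parts := parts.map (fun part =>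
    let part := PySem.Str.replace part "\\s" " "
    let part := PySem.Str.replace part "\\n" "\n"
    let part := PySem.Str.replace part "\\r" "\r"
    let part := PySem.Str.replace part "\\:" ";"
    part)
  PySem.Str.join "\\" parts

-- ===== PORT B =====
-- the dict literal _ESCAPES of Source B
def pvEscapes : PySem.Dict Char Char :=
  PySem.Dict.ofList [('s', ' '), ('n', '\n'), ('r', '\r'), (':', ';'), ('\\', '\\')]

def unescape_scan : List Char → List Char
  | [] => []
  | c :: t =>
    if c = '\\' then
      match t with
      | d :: r =>
        match pvEscapes.get? d with
        | some rep => rep :: unescape_scan r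
        | none => c :: unescape_scan (d :: r)
      | [] => [c]
    else c :: unescape_scan t

def unescape_tag_py_alt (value : String) : String :=
  String.ofList (unescape_scan value.toList)

-- ===== PRECONDITION & SPEC =====
def Spec_unescape_tag_py (value : String) (out : String) : Prop := out = unescape_tag_py_alt value
instance (value : String) (out : String) : Decidable (Spec_unescape_tag_py value out) := by unfold Spec_unescape_tag_py; infer_instance

-- ===== CLAIM (what is proved, stated in full; the proofs are below) =====
def Claim_equal_unescape_tag_py : Prop := ∀ (value : String), Dom_unescape_tag_py value → Spec_unescape_tag_py value (unescape_tag_py value)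

-- ===== LEMMAS AND PROOFS =====

def mySplit : List Char → List (List Char)
  | [] => [[]]
  | c :: rest =>
    if c = '\\' ∧ rest.head? = some '\\' then [] :: mySplit rest.tail
    else (mySplit rest).modifyHead (c :: ·)
termination_by l => l.length
decreasing_by all_goals (simp [List.length_tail]; try omega)

lemma go_zero (sep l cur : List Char) (acc : List (List Char)) :
    PySem.Chars.splitOn.go sep 0 l cur acc = ((cur.reverse ++ l) :: acc).reverse := by
  unfold PySem.Chars.splitOn.go; rfl

lemma go_nil (sep cur : List Char) (acc : List (List Char)) (fuel : Nat) :
    PySem.Chars.splitOn.go sep (fuel+1) [] cur acc = (cur.reverse :: acc).reverse := by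
  unfold PySem.Chars.splitOn.go; rfl

lemma go_cons (sep cur : List Char) (c : Char) (rest : List Char) (acc : List (List Char)) (fuel : Nat) :
    PySem.Chars.splitOn.go sep (fuel+1) (c :: rest) cur acc =
      (if sep.isPrefixOf (c :: rest) then PySem.Chars.splitOn.go sep fuel (List.drop sep.length (c::rest)) [] (cur.reverse :: acc)
       else PySem.Chars.splitOn.go sep fuel rest (c :: cur) acc) := by
  conv_lhs => unfold PySem.Chars.splitOn.go

theorem mySplit_ne_nil (l : List Char) : mySplit l ≠ [] := by
  cases l with
  | nil => simp [mySplit]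
  | cons c rest =>
    rw [mySplit]
    split
    · simp
    · obtain ⟨p, ps, hms⟩ := List.exists_cons_of_ne_nil (mySplit_ne_nil rest)
      simp [hms]
termination_by l.length
decreasing_by simp

lemma splitOn_go_eq : ∀ (fuel : Nat) (l cur : List Char) (acc : List (List Char)), l.length ≤ fuel →
    PySem.Chars.splitOn.go ['\\', '\\'] fuel l cur acc
      = acc.reverse ++ (mySplit l).modifyHead (cur.reverse ++ ·) := by
  intro fuel
  induction fuel with
  | zero =>
    intro l cur acc h
    have : l = [] := by cases l <;> simp_all
    subst this
    rw [go_zero, mySplit]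
    simp
  | succ n ih =>
    intro l cur acc h
    cases l with
    | nil => rw [go_nil, mySplit]; simp
    | cons c rest =>
      rw [go_cons]
      by_cases hp : (['\\', '\\'] : List Char).isPrefixOf (c :: rest)
      · -- c = '\\' and rest = '\\' :: r
        obtain ⟨r, hr⟩ : ∃ r, c = '\\' ∧ rest = '\\' :: r := by
          cases rest with
          | nil => simp [List.isPrefixOf] at hp
          | cons d r =>
            refine ⟨r, ?_⟩
            simp [List.isPrefixOf] at hp
            exact ⟨hp.1.symm, by rw [← hp.2]⟩
        obtain ⟨hc, hrest⟩ := hr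
        subst hc; subst hrest
        rw [if_pos hp]
        rw [ih _ _ _ (by simp at h ⊢; omega)]
        rw [mySplit]
        simp
        cases mySplit r <;> simp
      · -- not a separator occurrence
        rw [if_neg hp]
        rw [ih _ _ _ (by simp at h ⊢; omega)]
        rw [mySplit]
        have hcond : ¬(c = '\\' ∧ rest.head? = some '\\') := by
          intro ⟨h1, h2⟩
          cases rest with
          | nil => simp at h2
          | cons d r =>
            simp at h2
            exact hp (by simp [List.isPrefixOf, h1, h2])
        simp only [if_neg hcond]
        obtain ⟨p, ps, hps⟩ : ∃ p ps, mySplit rest = p :: ps := by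
          cases hms : mySplit rest with
          | nil =>
            exact absurd hms (mySplit_ne_nil rest)
          | cons p ps => exact ⟨p, ps, rfl⟩
        rw [hps]
        simp


lemma splitOn_eq (l : List Char) : PySem.Chars.splitOn l ['\\', '\\'] = mySplit l := by
  unfold PySem.Chars.splitOn
  rw [splitOn_go_eq (l.length + 1) l [] [] (by omega)]
  obtain ⟨p, ps, hms⟩ := List.exists_cons_of_ne_nil (mySplit_ne_nil l)
  simp [hms]

def myRepl (x : Char) (v : List Char) : List Char → List Char
  | [] => []
  | c :: t =>
    if c = '\\' ∧ t.head? = some x then v ++ myRepl x v t.tail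
    else c :: myRepl x v t
termination_by l => l.length
decreasing_by all_goals (simp [List.length_tail]; try omega)

lemma rgo_zero (old new l acc : List Char) : PySem.Chars.replace.go old new 0 l acc = acc.reverse ++ l := by
  unfold PySem.Chars.replace.go; rfl

lemma rgo_nil (old new acc : List Char) (fuel : Nat) : PySem.Chars.replace.go old new (fuel+1) [] acc = acc.reverse := by
  unfold PySem.Chars.replace.go; rfl

lemma rgo_cons (old new acc : List Char) (c : Char) (t : List Char) (fuel : Nat) :
    PySem.Chars.replace.go old new (fuel+1) (c :: t) acc =
      (if old.isPrefixOf (c :: t) then PySem.Chars.replace.go old new fuel (List.drop old.length (c::t)) (new.reverse ++ acc)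
       else PySem.Chars.replace.go old new fuel t (c :: acc)) := by
  conv_lhs => unfold PySem.Chars.replace.go

lemma replace_go_eq (x : Char) (v : List Char) : ∀ (fuel : Nat) (l acc : List Char), l.length ≤ fuel →
    PySem.Chars.replace.go ['\\', x] v fuel l acc = acc.reverse ++ myRepl x v l := by
  intro fuel
  induction fuel with
  | zero =>
    intro l acc h
    have : l = [] := by cases l <;> simp_all
    subst this
    rw [rgo_zero, myRepl]
  | succ n ih =>
    intro l acc h
    cases l with
    | nil => rw [rgo_nil, myRepl]; simp
    | cons c t =>
      rw [rgo_cons]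
      by_cases hp : (['\\', x] : List Char).isPrefixOf (c :: t)
      · obtain ⟨r, hc, ht⟩ : ∃ r, c = '\\' ∧ t = x :: r := by
          cases t with
          | nil => simp [List.isPrefixOf] at hp
          | cons d r =>
            refine ⟨r, ?_⟩
            simp [List.isPrefixOf] at hp
            exact ⟨hp.1.symm, by rw [← hp.2]⟩
        subst hc; subst ht
        rw [if_pos hp]
        rw [ih _ _ (by simp at h ⊢; omega)]
        rw [myRepl]
        simp
      · rw [if_neg hp]
        rw [ih _ _ (by simp at h ⊢; omega)]
        rw [myRepl]
        have hcond : ¬(c = '\\' ∧ t.head? = some x) := by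
          intro ⟨h1, h2⟩
          cases t with
          | nil => simp at h2
          | cons d r =>
            simp at h2
            exact hp (by simp [List.isPrefixOf, h1, h2])
        simp [if_neg hcond]

lemma replace_eq (x : Char) (v l : List Char) :
    PySem.Chars.replace l ['\\', x] v = myRepl x v l := by
  unfold PySem.Chars.replace
  rw [if_neg (by simp)]
  rw [replace_go_eq x v l.length l [] (by omega)]
  simp

def esc? (d : Char) : Option Char :=
  if d = 's' then some ' '
  else if d = 'n' then some '\n'
  else if d = 'r' then some '\r'
  else if d = ':' then some ';'
  else none

def gpart : List Char → List Char
  | [] => []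
  | c :: t =>
    match c == '\\', t.head?.bind esc? with
    | true, some e => e :: gpart t.tail
    | _, _ => c :: gpart t
termination_by l => l.length
decreasing_by all_goals (simp [List.length_tail]; try omega)

def chainR (p : List Char) : List Char :=
  myRepl ':' [';'] (myRepl 'r' ['\r'] (myRepl 'n' ['\n'] (myRepl 's' [' '] p)))

lemma myRepl_match (x : Char) (v t : List Char) :
    myRepl x v ('\\' :: x :: t) = v ++ myRepl x v t := by
  rw [myRepl]; simp

lemma myRepl_peel (x : Char) (v : List Char) (c : Char) (t : List Char) (h : c ≠ '\\') :
    myRepl x v (c :: t) = c :: myRepl x v t := by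
  rw [myRepl]; simp [h]

lemma myRepl_peel_bs (x : Char) (v t : List Char) (h : t.head? ≠ some x) :
    myRepl x v ('\\' :: t) = '\\' :: myRepl x v t := by
  rw [myRepl]; simp [h]

lemma gp_esc (e : Char) (t : List Char) (h2 : t.head?.bind esc? = some e) :
    gpart ('\\' :: t) = e :: gpart t.tail := by
  rw [gpart]; simp [h2]

lemma gp_ne (c : Char) (t : List Char) (h : c ≠ '\\') :
    gpart (c :: t) = c :: gpart t := by
  rw [gpart]; simp [h]

lemma gp_none (t : List Char) (h : t.head?.bind esc? = none) :
    gpart ('\\' :: t) = '\\' :: gpart t := by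
  rw [gpart]; simp [h]

def SafeHead (X : List Char) : Prop :=
  ∀ e, X.head? = some e → e = '\\' ∨ e = ' ' ∨ e = '\n' ∨ e = '\r'

lemma safe_rs (t : List Char) : SafeHead (myRepl 's' [' '] ('\\' :: t)) := by
  intro e he
  rw [myRepl] at he
  split at he
  · simp at he; tauto
  · simp at he; tauto

lemma safe_preserve (x : Char) (e' : Char)
    (he' : e' = '\\' ∨ e' = ' ' ∨ e' = '\n' ∨ e' = '\r')
    (X : List Char) (hX : SafeHead X) : SafeHead (myRepl x [e'] X) := by
  intro e he
  cases X with
  | nil => rw [myRepl] at he; simp at he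
  | cons c t =>
    rw [myRepl] at he
    split at he
    · simp at he; subst he; exact he'
    · simp at he; cases he; exact hX _ (by simp)

lemma myRepl_nil (x : Char) (v : List Char) : myRepl x v [] = [] := by rw [myRepl]

lemma gpart_nil : gpart [] = [] := by rw [gpart]

theorem chain_eq_gpart (p : List Char) : chainR p = gpart p := by
  cases p with
  | nil => simp [chainR, myRepl_nil, gpart_nil]
  | cons c t =>
    by_cases hc : c = '\\'
    · subst hc
      cases t with
      | nil =>
        have hbs : ∀ (x : Char) (v : List Char), myRepl x v ['\\'] = ['\\'] := by
          intro x v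
          rw [myRepl_peel_bs x v [] (by simp), myRepl_nil]
        simp [chainR, hbs, gp_none [] (by simp), gpart_nil]
      | cons d r =>
        by_cases hd : d = '\\'
        · subst hd
          have h1 : myRepl 's' [' '] ('\\' :: '\\' :: r) = '\\' :: myRepl 's' [' '] ('\\' :: r) :=
            myRepl_peel_bs _ _ _ (by simp)
          have hXs : SafeHead (myRepl 's' [' '] ('\\' :: r)) := safe_rs r
          have h2 : myRepl 'n' ['\n'] ('\\' :: myRepl 's' [' '] ('\\' :: r))
              = '\\' :: myRepl 'n' ['\n'] (myRepl 's' [' '] ('\\' :: r)) := by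
            apply myRepl_peel_bs
            intro hh
            have := hXs _ hh
            revert this; decide
          have hYs : SafeHead (myRepl 'n' ['\n'] (myRepl 's' [' '] ('\\' :: r))) :=
            safe_preserve _ _ (by tauto) _ hXs
          have h3 : myRepl 'r' ['\r'] ('\\' :: myRepl 'n' ['\n'] (myRepl 's' [' '] ('\\' :: r)))
              = '\\' :: myRepl 'r' ['\r'] (myRepl 'n' ['\n'] (myRepl 's' [' '] ('\\' :: r))) := by
            apply myRepl_peel_bs
            intro hh
            have := hYs _ hh
            revert this; decide
          have hZs : SafeHead (myRepl 'r' ['\r'] (myRepl 'n' ['\n'] (myRepl 's' [' '] ('\\' :: r)))) :=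
            safe_preserve _ _ (by tauto) _ hYs
          have h4 : myRepl ':' [';'] ('\\' :: myRepl 'r' ['\r'] (myRepl 'n' ['\n'] (myRepl 's' [' '] ('\\' :: r))))
              = '\\' :: myRepl ':' [';'] (myRepl 'r' ['\r'] (myRepl 'n' ['\n'] (myRepl 's' [' '] ('\\' :: r)))) := by
            apply myRepl_peel_bs
            intro hh
            have := hZs _ hh
            revert this; decide
          have key : chainR ('\\' :: '\\' :: r) = '\\' :: chainR ('\\' :: r) := by
            unfold chainR; rw [h1, h2, h3, h4]
          rw [key, chain_eq_gpart ('\\' :: r), gp_none ('\\' :: r) (by simp [esc?])]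
        · by_cases ds : d = 's'
          · subst ds
            have key : chainR ('\\' :: 's' :: r) = ' ' :: chainR r := by
              unfold chainR
              rw [myRepl_match 's' [' '] r]
              simp only [List.singleton_append]
              rw [myRepl_peel 'n' ['\n'] ' ' _ (by decide),
                  myRepl_peel 'r' ['\r'] ' ' _ (by decide),
                  myRepl_peel ':' [';'] ' ' _ (by decide)]
            rw [key, chain_eq_gpart r, gp_esc ' ' ('s' :: r) (by simp [esc?])]; rfl
          · by_cases dn : d = 'n'
            · subst dn
              have key : chainR ('\\' :: 'n' :: r) = '\n' :: chainR r := by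
                unfold chainR
                rw [myRepl_peel_bs 's' [' '] ('n' :: r) (by simp),
                    myRepl_peel 's' [' '] 'n' r (by decide),
                    myRepl_match 'n' ['\n'] (myRepl 's' [' '] r)]
                simp only [List.singleton_append]
                rw [myRepl_peel 'r' ['\r'] '\n' _ (by decide),
                    myRepl_peel ':' [';'] '\n' _ (by decide)]
              rw [key, chain_eq_gpart r, gp_esc '\n' ('n' :: r) (by simp [esc?])]; rfl
            · by_cases dr : d = 'r'
              · subst dr
                have key : chainR ('\\' :: 'r' :: r) = '\r' :: chainR r := by
                  unfold chainR
                  rw [myRepl_peel_bs 's' [' '] ('r' :: r) (by simp),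
                      myRepl_peel 's' [' '] 'r' r (by decide),
                      myRepl_peel_bs 'n' ['\n'] ('r' :: myRepl 's' [' '] r) (by simp),
                      myRepl_peel 'n' ['\n'] 'r' _ (by decide),
                      myRepl_match 'r' ['\r'] (myRepl 'n' ['\n'] (myRepl 's' [' '] r))]
                  simp only [List.singleton_append]
                  rw [myRepl_peel ':' [';'] '\r' _ (by decide)]
                rw [key, chain_eq_gpart r, gp_esc '\r' ('r' :: r) (by simp [esc?])]; rfl
              · by_cases dco : d = ':'
                · subst dco
                  have key : chainR ('\\' :: ':' :: r) = ';' :: chainR r := by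
                    unfold chainR
                    rw [myRepl_peel_bs 's' [' '] (':' :: r) (by simp),
                        myRepl_peel 's' [' '] ':' r (by decide),
                        myRepl_peel_bs 'n' ['\n'] (':' :: myRepl 's' [' '] r) (by simp),
                        myRepl_peel 'n' ['\n'] ':' _ (by decide),
                        myRepl_peel_bs 'r' ['\r'] (':' :: myRepl 'n' ['\n'] (myRepl 's' [' '] r)) (by simp),
                        myRepl_peel 'r' ['\r'] ':' _ (by decide),
                        myRepl_match ':' [';'] (myRepl 'r' ['\r'] (myRepl 'n' ['\n'] (myRepl 's' [' '] r)))]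
                    simp only [List.singleton_append]
                  rw [key, chain_eq_gpart r, gp_esc ';' (':' :: r) (by simp [esc?])]; rfl
                · have hnone : esc? d = none := by simp [esc?, ds, dn, dr, dco]
                  have key : chainR ('\\' :: d :: r) = '\\' :: d :: chainR r := by
                    unfold chainR
                    rw [myRepl_peel_bs 's' [' '] (d :: r) (by simp [ds]),
                        myRepl_peel 's' [' '] d r hd,
                        myRepl_peel_bs 'n' ['\n'] (d :: myRepl 's' [' '] r) (by simp [dn]),
                        myRepl_peel 'n' ['\n'] d _ hd,
                        myRepl_peel_bs 'r' ['\r'] (d :: myRepl 'n' ['\n'] (myRepl 's' [' '] r)) (by simp [dr]),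
                        myRepl_peel 'r' ['\r'] d _ hd,
                        myRepl_peel_bs ':' [';'] (d :: myRepl 'r' ['\r'] (myRepl 'n' ['\n'] (myRepl 's' [' '] r))) (by simp [dco]),
                        myRepl_peel ':' [';'] d _ hd]
                  rw [key, chain_eq_gpart r, gp_none (d :: r) (by simp [hnone]), gp_ne d r hd]
    · have key : chainR (c :: t) = c :: chainR t := by
        unfold chainR
        rw [myRepl_peel 's' [' '] c t hc,
            myRepl_peel 'n' ['\n'] c _ hc,
            myRepl_peel 'r' ['\r'] c _ hc,
            myRepl_peel ':' [';'] c _ hc]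
      rw [key, chain_eq_gpart t, gp_ne c t hc]
termination_by p.length
decreasing_by all_goals (simp; try omega)


set_option maxRecDepth 4096 in
lemma escGet_eq (d : Char) :
    pvEscapes.get? d = if d = '\\' then some '\\' else esc? d := by
  have hmk : pvEscapes = PySem.Dict.mk [('s', ' '), ('n', '\n'), ('r', '\r'), (':', ';'), ('\\', '\\')] := by decide
  by_cases h1 : d = 's'; · subst h1; decide
  by_cases h2 : d = 'n'; · subst h2; decide
  by_cases h3 : d = 'r'; · subst h3; decide
  by_cases h4 : d = ':'; · subst h4; decide
  by_cases h5 : d = '\\'; · subst h5; decide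
  rw [hmk]
  simp only [PySem.Dict.get?_mk_cons, beq_iff_eq]
  rw [if_neg (Ne.symm h1), if_neg (Ne.symm h2), if_neg (Ne.symm h3), if_neg (Ne.symm h4),
      if_neg (Ne.symm h5), if_neg h5]
  simp [esc?, h1, h2, h3, h4, PySem.Dict.get?]

lemma scan_ne (c : Char) (t : List Char) (h : c ≠ '\\') :
    unescape_scan (c :: t) = c :: unescape_scan t := by
  rw [unescape_scan.eq_def]; simp [h]

lemma scan_some (d : Char) (r : List Char) (rep : Char) (h : pvEscapes.get? d = some rep) :
    unescape_scan ('\\' :: d :: r) = rep :: unescape_scan r := by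
  rw [unescape_scan.eq_def]; simp [h]

lemma scan_none (d : Char) (r : List Char) (h : pvEscapes.get? d = none) :
    unescape_scan ('\\' :: d :: r) = '\\' :: unescape_scan (d :: r) := by
  rw [unescape_scan.eq_def]; simp [h]

lemma join_cons_head (sep : List Char) (c : Char) (h : List Char) (t : List (List Char)) :
    PySem.Chars.join sep ((c :: h) :: t) = c :: PySem.Chars.join sep (h :: t) := by
  cases t with
  | nil => rw [PySem.Chars.join_singleton, PySem.Chars.join_singleton]
  | cons q rest => rw [PySem.Chars.join_cons_cons, PySem.Chars.join_cons_cons]; simp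

theorem join_map_eq_scan (l : List Char) :
    PySem.Chars.join ['\\'] ((mySplit l).map gpart) = unescape_scan l := by
  cases l with
  | nil =>
    rw [mySplit]
    simp only [List.map]
    rw [PySem.Chars.join_singleton, gpart_nil]
    rfl
  | cons c t =>
    by_cases hc : c = '\\'
    · subst hc
      cases t with
      | nil =>
        have hm : mySplit ['\\'] = [['\\']] := by rw [mySplit]; simp [mySplit]
        rw [hm]
        simp only [List.map]
        rw [PySem.Chars.join_singleton, gp_none [] (by simp), gpart_nil]
        rfl
      | cons d r =>
        by_cases hd : d = '\\'
        · subst hd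
          have hm : mySplit ('\\' :: '\\' :: r) = [] :: mySplit r := by
            rw [mySplit, if_pos (by simp)]
            rfl
          rw [hm]
          obtain ⟨h, tt, hms⟩ := List.exists_cons_of_ne_nil (mySplit_ne_nil r)
          rw [hms]
          simp only [List.map]
          rw [gpart_nil, PySem.Chars.join_cons_cons]
          simp only [List.nil_append, List.singleton_append]
          have := join_map_eq_scan r
          rw [hms] at this
          simp only [List.map] at this
          rw [this, scan_some '\\' r '\\' (by decide)]
        · rw [mySplit, if_neg (by simp [hd]), mySplit, if_neg (by simp [hd])]
          obtain ⟨h, tt, hms⟩ := List.exists_cons_of_ne_nil (mySplit_ne_nil r)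
          rw [hms]
          simp only [List.modifyHead, List.map]
          cases hesc : esc? d with
          | some e =>
            rw [gp_esc e (d :: h) (by simp [hesc])]
            show PySem.Chars.join ['\\'] ((e :: gpart h) :: List.map gpart tt) = _
            rw [join_cons_head]
            have := join_map_eq_scan r
            rw [hms] at this
            simp only [List.map] at this
            rw [this, scan_some d r e (by rw [escGet_eq, if_neg hd, hesc])]
          | none =>
            rw [gp_none (d :: h) (by simp [hesc]), gp_ne d h hd]
            rw [join_cons_head, join_cons_head]
            have := join_map_eq_scan r
            rw [hms] at this
            simp only [List.map] at this
            rw [this, scan_none d r (by rw [escGet_eq, if_neg hd, hesc]), scan_ne d r hd]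
    · rw [mySplit, if_neg (by simp [hc])]
      obtain ⟨h, tt, hms⟩ := List.exists_cons_of_ne_nil (mySplit_ne_nil t)
      rw [hms]
      simp only [List.modifyHead, List.map]
      rw [gp_ne c h hc, join_cons_head]
      have := join_map_eq_scan t
      rw [hms] at this
      simp only [List.map] at this
      rw [this, scan_ne c t hc]
termination_by l.length
decreasing_by all_goals (simp; try omega)

-- A's pipeline equals B's scanner on every string
theorem ab_eq (value : String) : unescape_tag_py value = unescape_tag_py_alt value := by
  unfold unescape_tag_py unescape_tag_py_alt
  have hsplit : PySem.Str.split? value "\\\\" = some ((mySplit value.toList).map String.ofList) := by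
    unfold PySem.Str.split? PySem.Chars.split?
    rw [if_neg (by decide)]
    rw [show ("\\\\" : String).toList = ['\\', '\\'] from by decide]
    rw [splitOn_eq]
    rfl
  rw [hsplit]
  simp only [Option.getD_some, List.map_map]
  unfold PySem.Str.join
  rw [List.map_map]
  have hf : (String.toList ∘ (fun part =>
      PySem.Str.replace (PySem.Str.replace (PySem.Str.replace (PySem.Str.replace part "\\s" " ") "\\n" "\n") "\\r" "\r") "\\:" ";") ∘ String.ofList)
      = gpart := by
    funext p
    simp only [Function.comp_apply, PySem.Str.toList_replace, String.toList_ofList]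
    rw [show ("\\s" : String).toList = ['\\', 's'] from by decide,
        show ("\\n" : String).toList = ['\\', 'n'] from by decide,
        show ("\\r" : String).toList = ['\\', 'r'] from by decide,
        show ("\\:" : String).toList = ['\\', ':'] from by decide,
        show (" " : String).toList = [' '] from by decide,
        show ("\n" : String).toList = ['\n'] from by decide,
        show ("\r" : String).toList = ['\r'] from by decide,
        show (";" : String).toList = [';'] from by decide]
    rw [replace_eq, replace_eq, replace_eq, replace_eq]
    exact chain_eq_gpart p
  rw [hf]
  rw [show ("\\" : String).toList = ['\\'] from by decide]
  rw [join_map_eq_scan]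

-- ===== VERDICT (by name: the statement is the Claim_ definition above) =====
theorem unescape_tag_py_spec : Claim_equal_unescape_tag_py := by
  intro value _
  unfold Spec_unescape_tag_py
  exact ab_eq value
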